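-- pv_equiv track=rewrite | github.com/ferasaljoudi/ferasaljoudi | generate_joke.py | insert_joke_between_markers
-- ===== SOURCE A (Python) =====
-- def insert_joke_between_markers(start_marker, end_marker, styled_joke, readme):
--     start_idx = None
--     end_idx = None
--
--     for idx, line in enumerate(readme):
--         if start_marker in line:
--             start_idx = idx
--         if end_marker in line:
--             end_idx = idx
--
--     if start_idx is not None and end_idx is not None:
--         readme = readme[:start_idx+1] + [f"\n{styled_joke}\n"] + readme[end_idx:]
--     return readme
-- ===== SOURCE B (Python) =====
-- def insert_joke_between_markers(start_marker, end_marker, styled_joke, readme):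
--     start_idx = next((i for i in range(len(readme) - 1, -1, -1)
--                       if start_marker in readme[i]), None)
--     end_idx = next((i for i in range(len(readme) - 1, -1, -1)
--                     if end_marker in readme[i]), None)
--     if start_idx is not None and end_idx is not None:
--         return readme[:start_idx+1] + [f"\n{styled_joke}\n"] + readme[end_idx:]
--     return readme
-- ===== Notes on version B (the rewrite author's own statement) =====
-- stated objective: alternative
-- what changed: A's single forward pass that keeps overwriting both marker indices is replaced by two independent reverse short-circuiting searches (next over range(len-1,-1,-1)) that stop at the first hit, i.e. the last occurrence; the splice is unchanged.
import Mathlib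
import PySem

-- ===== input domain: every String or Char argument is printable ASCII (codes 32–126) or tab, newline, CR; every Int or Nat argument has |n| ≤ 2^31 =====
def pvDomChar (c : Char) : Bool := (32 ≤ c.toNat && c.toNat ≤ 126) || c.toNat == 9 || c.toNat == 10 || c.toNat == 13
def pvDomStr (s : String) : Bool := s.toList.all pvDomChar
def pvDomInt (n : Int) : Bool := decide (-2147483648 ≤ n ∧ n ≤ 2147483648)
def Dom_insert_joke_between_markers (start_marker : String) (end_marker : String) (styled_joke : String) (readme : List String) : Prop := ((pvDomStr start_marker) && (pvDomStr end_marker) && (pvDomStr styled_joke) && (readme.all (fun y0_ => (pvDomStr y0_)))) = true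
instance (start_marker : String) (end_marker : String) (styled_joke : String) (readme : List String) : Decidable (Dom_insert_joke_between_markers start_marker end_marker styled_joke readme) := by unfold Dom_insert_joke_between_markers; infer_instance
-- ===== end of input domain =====

-- B replaces A's single forward pass (overwriting both indices) by two reverse
-- short-circuiting searches for the last occurrence of each marker; same splice.
-- Objective: alternative decomposition of the same O(n) task.

-- ===== PORT A =====
def insert_joke_between_markers (start_marker : String) (end_marker : String) (styled_joke : String) (readme : List String) : List String :=
  let st : Option Int × Option Int :=
    (PySem.List.enumerate readme 0).foldl
      (fun (acc : Option Int × Option Int) (il : Int × String) =>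
        (if PySem.Str.isIn start_marker il.2 then some il.1 else acc.1,
         if PySem.Str.isIn end_marker il.2 then some il.1 else acc.2))
      (none, none)
  match st.1, st.2 with
  | some start_idx, some end_idx =>
      PySem.List.slice readme none (some (start_idx + 1))
        ++ ["\n" ++ styled_joke ++ "\n"]
        ++ PySem.List.slice readme (some end_idx) none
  | _, _ => readme

-- ===== PORT B =====
def insert_joke_between_markers_alt (start_marker : String) (end_marker : String) (styled_joke : String) (readme : List String) : List String :=
  let start_idx := (PySem.List.pyRange ((readme.length : Int) - 1) (-1) (-1)).find?
      (fun i => PySem.Str.isIn start_marker (PySem.List.pyGetD readme i ""))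
  let end_idx := (PySem.List.pyRange ((readme.length : Int) - 1) (-1) (-1)).find?
      (fun i => PySem.Str.isIn end_marker (PySem.List.pyGetD readme i ""))
  match start_idx with
  | none => readme
  | some si =>
      match end_idx with
      | none => readme
      | some ei =>
          PySem.List.slice readme none (some (si + 1))
            ++ ["\n" ++ styled_joke ++ "\n"]
            ++ PySem.List.slice readme (some ei) none

-- ===== PRECONDITION & SPEC =====
def Spec_insert_joke_between_markers (start_marker : String) (end_marker : String) (styled_joke : String) (readme : List String) (out : List String) : Prop := out = insert_joke_between_markers_alt start_marker end_marker styled_joke readme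
instance (start_marker : String) (end_marker : String) (styled_joke : String) (readme : List String) (out : List String) : Decidable (Spec_insert_joke_between_markers start_marker end_marker styled_joke readme out) := by unfold Spec_insert_joke_between_markers; infer_instance

-- ===== CLAIM (what is proved, stated in full; the proofs are below) =====
def Claim_equal_insert_joke_between_markers : Prop := ∀ (start_marker : String) (end_marker : String) (styled_joke : String) (readme : List String), Dom_insert_joke_between_markers start_marker end_marker styled_joke readme → Spec_insert_joke_between_markers start_marker end_marker styled_joke readme (insert_joke_between_markers start_marker end_marker styled_joke readme)

-- ===== LEMMAS AND PROOFS =====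

-- A's fold carries a pair whose components never interact: split it.
lemma pv_foldl_pair {α β γ : Type} (f : β → α → β) (g : γ → α → γ)
    (l : List α) (a : β) (b : γ) :
    l.foldl (fun q x => (f q.1 x, g q.2 x)) (a, b) = (l.foldl f a, l.foldl g b) := by
  induction l generalizing a b with
  | nil => rfl
  | cons x xs ih => simp [List.foldl_cons, ih]

lemma pv_find?_congr {α : Type} (p q : α → Bool) (l : List α)
    (h : ∀ x ∈ l, p x = q x) : l.find? p = l.find? q := by
  induction l with
  | nil => rfl
  | cons x xs ih =>
      simp only [List.find?_cons]
      rw [h x (by simp)]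
      cases q x <;> simp [ih (fun y hy => h y (by simp [hy]))]

-- The last index whose line satisfies p (A's overwrite-fold) equals the first
-- hit of the reverse-range search (B).
lemma pv_last_eq_revfind (p : String → Bool) (xs : List String) :
    (PySem.List.enumerate xs 0).foldl
        (fun (a : Option Int) (il : Int × String) => if p il.2 then some il.1 else a) none
      = (PySem.List.pyRange ((xs.length : Int) - 1) (-1) (-1)).find?
          (fun i => p (PySem.List.pyGetD xs i "")) := by
  induction xs using List.reverseRecOn with
  | nil =>
      rw [PySem.List.pyRange_neg_one_eq_nil (by norm_num)]
      rfl
  | append_singleton xs x ih =>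
      rw [PySem.List.enumerate_append, List.foldl_append]
      have hlen : ((xs ++ [x]).length : Int) - 1 = (xs.length : Int) := by
        simp
      rw [hlen, PySem.List.pyRange_neg_one_cons (by omega)]
      simp only [PySem.List.enumerate_cons, PySem.List.enumerate_nil, List.foldl_cons,
        List.foldl_nil, List.find?_cons]
      have hx : PySem.List.pyGetD (xs ++ [x]) (xs.length : Int) "" = x := by
        rw [PySem.List.pyGetD_eq_getElem (xs ++ [x]) "" (by omega) (by simp)]
        simp
      rw [hx]
      have hrest : (PySem.List.pyRange ((xs.length : Int) - 1) (-1) (-1)).find?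
            (fun i => p (PySem.List.pyGetD (xs ++ [x]) i ""))
          = (PySem.List.pyRange ((xs.length : Int) - 1) (-1) (-1)).find?
            (fun i => p (PySem.List.pyGetD xs i "")) := by
        apply pv_find?_congr
        intro i hi
        rw [PySem.List.mem_pyRange_neg_one] at hi
        have h0 : 0 ≤ i := by omega
        have h1 : i < (xs.length : Int) := by omega
        rw [PySem.List.pyGetD_eq_getElem (xs ++ [x]) "" h0 (by simp; omega),
            PySem.List.pyGetD_eq_getElem xs "" h0 (by omega)]
        rw [List.getElem_append_left (by omega)]
      rw [hrest, ← ih]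
      cases hpx : p x <;> simp

-- ===== VERDICT (by name: the statement is the Claim_ definition above) =====
theorem insert_joke_between_markers_spec : Claim_equal_insert_joke_between_markers := by
  intro sm em sj readme _
  unfold Spec_insert_joke_between_markers
  unfold insert_joke_between_markers insert_joke_between_markers_alt
  rw [pv_foldl_pair
        (fun (a : Option Int) (il : Int × String) =>
          if PySem.Str.isIn sm il.2 then some il.1 else a)
        (fun (a : Option Int) (il : Int × String) =>
          if PySem.Str.isIn em il.2 then some il.1 else a),
      pv_last_eq_revfind, pv_last_eq_revfind]
  cases (PySem.List.pyRange ((readme.length : Int) - 1) (-1) (-1)).find?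
      (fun i => PySem.Str.isIn sm (PySem.List.pyGetD readme i "")) <;>
    cases (PySem.List.pyRange ((readme.length : Int) - 1) (-1) (-1)).find?
        (fun i => PySem.Str.isIn em (PySem.List.pyGetD readme i "")) <;>
      rfl
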